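-- pv_equiv track=rewrite | github.com/abitofhelp/adafmt | src/adafmt/gnat_validator.py | _extract_declarations_from_body
-- ===== SOURCE A (Python) =====
-- def _extract_declarations_from_body(body_content: str) -> str:
--     """Extract function and procedure declarations from package body.
--
--     Args:
--         body_content: Content of the package body
--
--     Returns:
--         str: Declaration strings for the specification
--     """
--     declarations = []
--     lines = body_content.split('\n')
--     i = 0
--
--     while i < len(lines):
--         line = lines[i].strip()
--
--         # Look for function or procedure declarations
--         if (line.startswith('function ') or line.startswith('procedure ')) and ' is ' in line:
--             # Extract the declaration part (before 'is')
--             declaration = line.split(' is ')[0].strip()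
--
--             # Handle multi-line declarations
--             while not declaration.endswith(';') and i + 1 < len(lines):
--                 i += 1
--                 next_line = lines[i].strip()
--                 if ' is ' in next_line:
--                     declaration += ' ' + next_line.split(' is ')[0].strip()
--                     break
--                 else:
--                     declaration += ' ' + next_line
--
--             # Clean up and add semicolon if needed
--             if not declaration.endswith(';'):
--                 declaration += ';'
--
--             declarations.append(f'   {declaration}')
--
--         i += 1
--
--     return '\n'.join(declarations) if declarations else '   -- No public declarations'
-- ===== SOURCE B (Python) =====
-- def _extract_declarations_from_body(body_content: str) -> str:
--     """Single streaming pass with a `pending` state variable instead of an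
--     index-driven outer loop with a nested consuming inner loop."""
--     declarations = []
--
--     def emit(decl):
--         if not decl.endswith(';'):
--             decl += ';'
--         declarations.append('   ' + decl)
--
--     pending = None
--     for raw in body_content.split('\n'):
--         line = raw.strip()
--         if pending is None:
--             if (line.startswith('function ') or line.startswith('procedure ')) and ' is ' in line:
--                 decl = line.split(' is ')[0].strip()
--                 if decl.endswith(';'):
--                     emit(decl)
--                 else:
--                     pending = decl
--         else:
--             if ' is ' in line:
--                 emit(pending + ' ' + line.split(' is ')[0].strip())
--                 pending = None
--             else:
--                 pending = pending + ' ' + line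
--                 if pending.endswith(';'):
--                     emit(pending)
--                     pending = None
--     if pending is not None:
--         emit(pending)
--     return '\n'.join(declarations) if declarations else '   -- No public declarations'
-- ===== Notes on version B (the rewrite author's own statement) =====
-- stated objective: alternative
-- what changed: Replaced A's index-driven while loop with a nested inner while that consumes continuation lines by a single for-loop state machine carrying a `pending` partial declaration (None when outside a declaration), flushed after the loop.
import Mathlib
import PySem

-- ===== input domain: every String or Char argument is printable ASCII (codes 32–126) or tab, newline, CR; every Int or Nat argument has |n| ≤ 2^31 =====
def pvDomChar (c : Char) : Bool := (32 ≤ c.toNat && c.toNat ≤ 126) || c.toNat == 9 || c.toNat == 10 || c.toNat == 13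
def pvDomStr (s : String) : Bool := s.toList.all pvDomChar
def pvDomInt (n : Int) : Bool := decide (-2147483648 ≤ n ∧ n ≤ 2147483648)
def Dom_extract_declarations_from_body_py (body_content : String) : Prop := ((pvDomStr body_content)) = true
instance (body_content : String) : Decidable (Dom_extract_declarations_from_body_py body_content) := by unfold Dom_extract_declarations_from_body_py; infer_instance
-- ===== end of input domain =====

-- B replaces A's index-driven outer while with a nested consuming inner while by a single
-- streaming pass carrying a `pending` partial declaration (objective: alternative decomposition).

-- `line.split(' is ')[0].strip()`, used verbatim by both Pythons
-- (split? returns none only for an empty separator, so getD [] is never the fallback)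
def pvBeforeIs (line : String) : String :=
  PySem.Str.strip (((PySem.Str.split? line " is ").getD []).headD "")

-- ===== PORT A =====
-- inner `while not declaration.endswith(';') and i + 1 < len(lines)` loop of A,
-- returning the finished declaration and the remaining (unconsumed) lines
def pvAInner (decl : String) (rest : List String) : String × List String :=
  if PySem.Str.endswith decl ";" then (decl, rest)
  else
    match rest with
    | [] => (decl, [])
    | n :: rest' =>
      if PySem.Str.isIn " is " (PySem.Str.strip n) then
        (decl ++ " " ++ pvBeforeIs (PySem.Str.strip n), rest')
      else pvAInner (decl ++ " " ++ PySem.Str.strip n) rest'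

theorem pvAInner_len (decl : String) (rest : List String) :
    (pvAInner decl rest).2.length ≤ rest.length := by
  induction rest generalizing decl with
  | nil => rw [pvAInner]; split <;> simp
  | cons n rest' ih =>
    rw [pvAInner]
    split
    · simp
    · split
      · simp
      · exact le_trans (ih _) (Nat.le_succ _)

-- outer `while i < len(lines)` loop of A, with `declarations` as accumulator
def pvALoop : List String → List String → List String
  | [], acc => acc
  | l :: rest, acc =>
    if (PySem.Str.startswith (PySem.Str.strip l) "function "
        || PySem.Str.startswith (PySem.Str.strip l) "procedure ")
        && PySem.Str.isIn " is " (PySem.Str.strip l) then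
      pvALoop (pvAInner (pvBeforeIs (PySem.Str.strip l)) rest).2
        (acc ++ ["   " ++
          (if PySem.Str.endswith (pvAInner (pvBeforeIs (PySem.Str.strip l)) rest).1 ";" then
            (pvAInner (pvBeforeIs (PySem.Str.strip l)) rest).1
          else (pvAInner (pvBeforeIs (PySem.Str.strip l)) rest).1 ++ ";")])
    else pvALoop rest acc
  termination_by lines _ => lines.length
  decreasing_by
  · exact Nat.lt_succ_of_le (pvAInner_len _ _)
  · simp

def extract_declarations_from_body_py (body_content : String) : String :=
  let declarations := pvALoop ((PySem.Str.split? body_content "\n").getD []) []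
  if declarations.isEmpty then "   -- No public declarations"
  else PySem.Str.join "\n" declarations

-- ===== PORT B =====
-- `emit` helper of B: add ';' if needed, indent, append
def pvBEmit (acc : List String) (d : String) : List String :=
  acc ++ ["   " ++ (if PySem.Str.endswith d ";" then d else d ++ ";")]

-- single for-loop of B with a `pending` state; flushes pending at end of input
def pvBLoop : List String → Option String → List String → List String
  | [], pending, acc =>
    match pending with
    | none => acc
    | some p => pvBEmit acc p
  | raw :: rest, pending, acc =>
    match pending with
    | none =>
      if (PySem.Str.startswith (PySem.Str.strip raw) "function "
          || PySem.Str.startswith (PySem.Str.strip raw) "procedure ")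
          && PySem.Str.isIn " is " (PySem.Str.strip raw) then
        if PySem.Str.endswith (pvBeforeIs (PySem.Str.strip raw)) ";" then
          pvBLoop rest none (pvBEmit acc (pvBeforeIs (PySem.Str.strip raw)))
        else pvBLoop rest (some (pvBeforeIs (PySem.Str.strip raw))) acc
      else pvBLoop rest none acc
    | some p =>
      if PySem.Str.isIn " is " (PySem.Str.strip raw) then
        pvBLoop rest none (pvBEmit acc (p ++ " " ++ pvBeforeIs (PySem.Str.strip raw)))
      else
        if PySem.Str.endswith (p ++ " " ++ PySem.Str.strip raw) ";" then
          pvBLoop rest none (pvBEmit acc (p ++ " " ++ PySem.Str.strip raw))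
        else pvBLoop rest (some (p ++ " " ++ PySem.Str.strip raw)) acc

def extract_declarations_from_body_py_alt (body_content : String) : String :=
  let declarations := pvBLoop ((PySem.Str.split? body_content "\n").getD []) none []
  if declarations.isEmpty then "   -- No public declarations"
  else PySem.Str.join "\n" declarations

-- ===== PRECONDITION & SPEC =====
def Spec_extract_declarations_from_body_py (body_content : String) (out : String) : Prop := out = extract_declarations_from_body_py_alt body_content
instance (body_content : String) (out : String) : Decidable (Spec_extract_declarations_from_body_py body_content out) := by unfold Spec_extract_declarations_from_body_py; infer_instance

-- ===== CLAIM (what is proved, stated in full; the proofs are below) =====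
def Claim_equal_extract_declarations_from_body_py : Prop := ∀ (body_content : String), Dom_extract_declarations_from_body_py body_content → Spec_extract_declarations_from_body_py body_content (extract_declarations_from_body_py body_content)

-- ===== LEMMAS AND PROOFS =====

theorem pvAInner_done {decl : String} (he : PySem.Str.endswith decl ";" = true)
    (rest : List String) : pvAInner decl rest = (decl, rest) := by
  rw [pvAInner.eq_def, if_pos he]

theorem pvAInner_cons {decl : String} (hne : PySem.Str.endswith decl ";" = false)
    (l : String) (rest : List String) :
    pvAInner decl (l :: rest) =
      if PySem.Str.isIn " is " (PySem.Str.strip l) then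
        (decl ++ " " ++ pvBeforeIs (PySem.Str.strip l), rest)
      else pvAInner (decl ++ " " ++ PySem.Str.strip l) rest := by
  rw [pvAInner.eq_def, if_neg (by rw [hne]; simp)]

-- mutual invariant: with no pending state B's loop is A's outer loop; with a pending `decl`
-- (not yet ';'-terminated) B's loop finishes the declaration exactly as A's inner loop does
theorem pvLoop_agree : ∀ n : Nat,
    (∀ lines : List String, lines.length = n → ∀ acc,
      pvBLoop lines none acc = pvALoop lines acc) ∧
    (∀ lines : List String, lines.length = n →
      ∀ decl, PySem.Str.endswith decl ";" = false → ∀ acc,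
      pvBLoop lines (some decl) acc
        = pvALoop (pvAInner decl lines).2 (pvBEmit acc (pvAInner decl lines).1)) := by
  intro n
  induction n using Nat.strong_induction_on with
  | _ n ih =>
    constructor
    · intro lines hlen acc
      cases lines with
      | nil => rw [pvBLoop, pvALoop]
      | cons l rest =>
        simp only [List.length_cons] at hlen
        rw [pvBLoop, pvALoop]
        by_cases hc : ((PySem.Str.startswith (PySem.Str.strip l) "function "
            || PySem.Str.startswith (PySem.Str.strip l) "procedure ")
            && PySem.Str.isIn " is " (PySem.Str.strip l)) = true
        · rw [if_pos hc, if_pos hc]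
          by_cases he : PySem.Str.endswith (pvBeforeIs (PySem.Str.strip l)) ";" = true
          · rw [if_pos he, pvAInner_done he, (ih rest.length (by omega)).1 rest rfl]
            simp only [pvBEmit]
          · rw [if_neg he,
              (ih rest.length (by omega)).2 rest rfl _ (by rw [Bool.eq_false_iff]; exact he)]
            rfl
        · rw [if_neg hc, if_neg hc]
          exact (ih rest.length (by omega)).1 rest rfl acc
    · intro lines hlen decl hne acc
      cases lines with
      | nil =>
        rw [pvBLoop, pvAInner.eq_def, if_neg (by rw [hne]; simp), pvALoop]
      | cons l rest =>
        simp only [List.length_cons] at hlen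
        rw [pvBLoop, pvAInner_cons hne]
        by_cases hi : PySem.Str.isIn " is " (PySem.Str.strip l) = true
        · rw [if_pos hi, if_pos hi, (ih rest.length (by omega)).1 rest rfl]
        · rw [if_neg hi, if_neg hi]
          by_cases he : PySem.Str.endswith (decl ++ " " ++ PySem.Str.strip l) ";" = true
          · rw [if_pos he, pvAInner_done he, (ih rest.length (by omega)).1 rest rfl]
          · rw [if_neg he]
            exact (ih rest.length (by omega)).2 rest rfl _
              (by rw [Bool.eq_false_iff]; exact he) acc

-- ===== VERDICT (by name: the statement is the Claim_ definition above) =====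
theorem extract_declarations_from_body_py_spec : Claim_equal_extract_declarations_from_body_py := by
  intro body_content _
  unfold Spec_extract_declarations_from_body_py
  unfold extract_declarations_from_body_py extract_declarations_from_body_py_alt
  rw [(pvLoop_agree ((PySem.Str.split? body_content "\n").getD []).length).1 _ rfl []]
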